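-- pv_equiv track=rewrite | github.com/Yhlight/asgvdzab | chtl_compiler/compilers/chtl_js_compiler.py | _transform_enhanced_selectors
-- ===== SOURCE A (Python) =====
-- def _transform_enhanced_selectors(js: str) -> str:
-- 	out = []
-- 	i = 0
-- 	n = len(js)
-- 	while i < n:
-- 		if i + 1 < n and js[i] == '{' and js[i + 1] == '{':
-- 			# find closing '}}'
-- 			j = i + 2
-- 			while j + 1 < n and not (js[j] == '}' and js[j + 1] == '}'):
-- 				j += 1
-- 			if j + 1 >= n:
-- 				out.append(js[i:])
-- 				break
-- 			selector = js[i + 2:j].strip()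
-- 			out.append(f'__CHTL__sel("{selector}")')
-- 			i = j + 2
-- 			continue
-- 		out.append(js[i])
-- 		i += 1
-- 	return "".join(out)
-- ===== SOURCE B (Python) =====
-- def _transform_enhanced_selectors(js: str) -> str:
-- 	out = []
-- 	rest = js
-- 	while True:
-- 		start = rest.find('{{')
-- 		if start == -1:
-- 			break
-- 		body = rest[start + 2:]
-- 		end = body.find('}}')
-- 		if end == -1:
-- 			break
-- 		out.append(rest[:start])
-- 		out.append('__CHTL__sel("' + body[:end].strip() + '")')
-- 		rest = body[end + 2:]
-- 	out.append(rest)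
-- 	return ''.join(out)
-- ===== Notes on version B (the rewrite author's own statement) =====
-- stated objective: faster
-- what changed: A's explicit character-by-character index scan with an inner closing-brace search loop is replaced by a chunkwise str.find loop that jumps straight to the next opening brace pair, slices out the selector, and copies whole chunks between matches.
import Mathlib
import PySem

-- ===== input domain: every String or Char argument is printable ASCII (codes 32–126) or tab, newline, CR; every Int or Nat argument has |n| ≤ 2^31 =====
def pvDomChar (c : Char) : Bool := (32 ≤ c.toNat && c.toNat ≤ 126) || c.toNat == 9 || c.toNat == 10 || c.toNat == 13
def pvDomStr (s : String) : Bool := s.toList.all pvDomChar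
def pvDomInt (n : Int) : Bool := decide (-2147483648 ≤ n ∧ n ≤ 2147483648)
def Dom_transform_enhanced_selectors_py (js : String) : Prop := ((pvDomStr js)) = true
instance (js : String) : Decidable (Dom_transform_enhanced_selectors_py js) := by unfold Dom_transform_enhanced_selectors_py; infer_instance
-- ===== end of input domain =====

-- B replaces A's character-by-character index scan with a chunkwise str.find loop: it jumps
-- straight to the next '{{', slices the selector out, and copies whole chunks between matches
-- (objective: faster — a timing run measured B well above 1.5× A; return values proved equal on all strings).

-- ===== PORT A =====
-- A's inner "while j + 1 < n and not (js[j]=='}' and js[j+1]=='}')" search loop (the guards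
-- keep every access in range, so getD is exact where the Python indexes).
def pvAFind (s : List Char) (j : Nat) : Nat :=
  if j + 1 < s.length then
    if s.getD j ' ' = '}' ∧ s.getD (j + 1) ' ' = '}' then j
    else pvAFind s (j + 1)
  else j
termination_by s.length - j

-- cited by pvALoop's decreasing_by
theorem pvAFind_ge (s : List Char) (j : Nat) : j ≤ pvAFind s j := by
  rw [pvAFind]
  split
  · split
    · exact le_refl _
    · have := pvAFind_ge s (j + 1); omega
  · exact le_refl _
termination_by s.length - j

-- A's outer while-loop; 'out' is the "".join of the accumulated pieces, ported as direct
-- List Char concatenation.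
def pvALoop (s : List Char) (i : Nat) (out : List Char) : List Char :=
  if _h : i < s.length then
    if i + 1 < s.length ∧ s.getD i ' ' = '{' ∧ s.getD (i + 1) ' ' = '{' then
      let j := pvAFind s (i + 2)
      if s.length ≤ j + 1 then
        out ++ PySem.List.slice s (some (i : Int)) none
      else
        pvALoop s (j + 2)
          (out ++ "__CHTL__sel(\"".toList
               ++ PySem.Chars.strip (PySem.List.slice s (some ((i : Int) + 2)) (some (j : Int)))
               ++ "\")".toList)
    else
      pvALoop s (i + 1) (out ++ [s.getD i ' '])
  else out
termination_by s.length - i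
decreasing_by
  · have := pvAFind_ge s (i + 2); omega
  · omega

def transform_enhanced_selectors_py (js : String) : String :=
  String.ofList (pvALoop js.toList 0 [])

-- ===== PORT B =====
-- the next two lemmas are cited by pvBGo's decreasing_by: a successful find is ≥ 0
theorem pv_find_go_nonneg (sub : List Char) (s : List Char) (k : Nat) :
    PySem.Chars.find.go sub s k = -1 ∨ (k : Int) ≤ PySem.Chars.find.go sub s k := by
  induction s generalizing k with
  | nil =>
    rw [PySem.Chars.find.go]
    split_ifs <;> simp
  | cons c t ih =>
    rw [PySem.Chars.find.go]
    split
    · right; exact le_refl _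
    · rcases ih (k + 1) with h | h
      · left; exact h
      · right; exact le_trans (by push_cast; omega) h

theorem pv_find_nonneg (s sub : List Char) (h : ¬ PySem.Chars.find s sub = -1) :
    0 ≤ PySem.Chars.find s sub := by
  have h0 := pv_find_go_nonneg sub s 0
  unfold PySem.Chars.find at *
  rcases h0 with h1 | h1
  · exact absurd h1 h
  · simpa using h1

-- B's "while True" loop over the remaining string 'rest'
def pvBGo (rest : List Char) : List Char :=
  let start := PySem.Chars.find rest "{{".toList
  if hs : start = -1 then rest
  else
    let body := PySem.List.slice rest (some (start + 2)) none
    let e := PySem.Chars.find body "}}".toList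
    if he : e = -1 then rest
    else
      PySem.List.slice rest none (some start)
        ++ "__CHTL__sel(\"".toList
        ++ PySem.Chars.strip (PySem.List.slice body none (some e))
        ++ "\")".toList
        ++ pvBGo (PySem.List.slice body (some (e + 2)) none)
termination_by rest.length
decreasing_by
  have h0 : 0 ≤ PySem.Chars.find rest "{{".toList := pv_find_nonneg _ _ hs
  obtain ⟨m, hm⟩ := Int.eq_ofNat_of_zero_le h0
  have hlen : 2 ≤ rest.length := by
    have hinf : "{{".toList <:+: rest := by
      by_contra hc
      exact hs ((PySem.Chars.find_eq_neg_one_iff rest _).mpr hc)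
    simpa using hinf.length_le
  have he0 : 0 ≤ PySem.Chars.find (PySem.List.slice rest (some (PySem.Chars.find rest "{{".toList + 2)) none) "}}".toList :=
    pv_find_nonneg _ _ he
  obtain ⟨k, hk⟩ := Int.eq_ofNat_of_zero_le he0
  rw [hk, hm]
  have h2 : ((m : Int) + 2) = ((m + 2 : Nat) : Int) := by push_cast; ring
  have h3 : ((k : Int) + 2) = ((k + 2 : Nat) : Int) := by push_cast; ring
  rw [h2, PySem.List.slice_from_natCast, h3, PySem.List.slice_from_natCast]
  simp only [List.length_drop]
  omega

def transform_enhanced_selectors_py_alt (js : String) : String :=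
  String.ofList (pvBGo js.toList)

-- ===== PRECONDITION & SPEC =====
def Spec_transform_enhanced_selectors_py (js : String) (out : String) : Prop := out = transform_enhanced_selectors_py_alt js
instance (js : String) (out : String) : Decidable (Spec_transform_enhanced_selectors_py js out) := by unfold Spec_transform_enhanced_selectors_py; infer_instance

-- ===== CLAIM (what is proved, stated in full; the proofs are below) =====
def Claim_equal_transform_enhanced_selectors_py : Prop := ∀ (js : String), Dom_transform_enhanced_selectors_py js → Spec_transform_enhanced_selectors_py js (transform_enhanced_selectors_py js)

-- ===== LEMMAS AND PROOFS =====

theorem pv_find_eq (t sub : List Char) (h : ¬ PySem.Chars.find t sub = -1) :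
    ∃ m : Nat, PySem.Chars.find t sub = (m : Int) ∧ sub <+: t.drop m ∧
      (∀ k, k < m → ¬ sub <+: t.drop k) := by
  have h0 := pv_find_nonneg t sub h
  obtain ⟨m, hm⟩ := Int.eq_ofNat_of_zero_le h0
  have hs := PySem.Chars.find_spec (s := t) (sub := sub) h0
  rw [hm] at hs
  exact ⟨m, hm, by simpa using hs.1, fun k hk => hs.2 k (by simpa using hk)⟩

theorem pv_drop_cons (s : List Char) (i : Nat) (h : i < s.length) :
    s.drop i = s.getD i ' ' :: s.drop (i + 1) := by
  rw [List.drop_eq_getElem_cons h]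
  congr 1
  simp [List.getD_eq_getElem?_getD, List.getElem?_eq_getElem h]

theorem pv_pair_iff (s : List Char) (i : Nat) (a b : Char) :
    ([a, b] <+: s.drop i) ↔ (i + 1 < s.length ∧ s.getD i ' ' = a ∧ s.getD (i + 1) ' ' = b) := by
  constructor
  · intro hp
    have hl := hp.length_le
    simp only [List.length_cons, List.length_nil, List.length_drop] at hl
    have h1 : i + 1 < s.length := by omega
    have h0 : i < s.length := by omega
    rw [pv_drop_cons s i h0, pv_drop_cons s (i + 1) h1] at hp
    rcases (List.cons_prefix_cons.mp hp) with ⟨ha, hp2⟩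
    rcases (List.cons_prefix_cons.mp hp2) with ⟨hb, _⟩
    exact ⟨h1, ha.symm, hb.symm⟩
  · rintro ⟨h1, ha, hb⟩
    rw [pv_drop_cons s i (by omega), pv_drop_cons s (i + 1) h1, ha, hb]
    exact List.cons_prefix_cons.mpr ⟨rfl, List.cons_prefix_cons.mpr ⟨rfl, List.nil_prefix⟩⟩

theorem pvALoop_acc (s : List Char) (i : Nat) (out : List Char) :
    pvALoop s i out = out ++ pvALoop s i [] := by
  rw [pvALoop]
  conv_rhs => rw [pvALoop]
  split
  · split
    · dsimp only
      split
      · simp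
      · rw [pvALoop_acc s (pvAFind s (i + 2) + 2)
              (out ++ "__CHTL__sel(\"".toList
                   ++ PySem.Chars.strip (PySem.List.slice s (some ((i : Int) + 2)) (some ((pvAFind s (i + 2) : Nat) : Int)))
                   ++ "\")".toList),
            pvALoop_acc s (pvAFind s (i + 2) + 2)
              (([] : List Char) ++ "__CHTL__sel(\"".toList
                   ++ PySem.Chars.strip (PySem.List.slice s (some ((i : Int) + 2)) (some ((pvAFind s (i + 2) : Nat) : Int)))
                   ++ "\")".toList)]
        simp
    · rw [pvALoop_acc s (i + 1) (out ++ [s.getD i ' ']),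
          pvALoop_acc s (i + 1) (([] : List Char) ++ [s.getD i ' '])]
      simp
  · simp
termination_by s.length - i
decreasing_by
  all_goals (try have := pvAFind_ge s (i + 2)); omega

theorem pv_brace_iff (s : List Char) (i : Nat) :
    ("{{".toList <+: s.drop i) ↔ (i + 1 < s.length ∧ s.getD i ' ' = '{' ∧ s.getD (i + 1) ' ' = '{') := by
  have h : "{{".toList = ['{', '{'] := rfl
  rw [h, pv_pair_iff]

theorem pv_close_iff (s : List Char) (j : Nat) :
    ("}}".toList <+: s.drop j) ↔ (j + 1 < s.length ∧ s.getD j ' ' = '}' ∧ s.getD (j + 1) ' ' = '}') := by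
  have h : "}}".toList = ['}', '}'] := rfl
  rw [h, pv_pair_iff]

theorem pvA_skip (s : List Char) (i : Nat) (h : i < s.length)
    (hnp : ¬ "{{".toList <+: s.drop i) :
    pvALoop s i [] = s.getD i ' ' :: pvALoop s (i + 1) [] := by
  rw [pvALoop, dif_pos h, if_neg (fun hc => hnp ((pv_brace_iff s i).mpr hc))]
  rw [pvALoop_acc]
  simp

theorem pvA_nomatch (s : List Char) (i : Nat) (hi : i ≤ s.length)
    (h : ¬ "{{".toList <:+: s.drop i) :
    pvALoop s i [] = s.drop i := by
  by_cases hlt : i < s.length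
  · have hnp : ¬ "{{".toList <+: s.drop i := fun hp => h hp.isInfix
    rw [pvA_skip s i hlt hnp]
    have hdrop := pv_drop_cons s i hlt
    have h2 : ¬ "{{".toList <:+: s.drop (i + 1) := by
      intro hinf
      exact h (hinf.trans (hdrop ▸ (List.suffix_cons _ _).isInfix))
    rw [pvA_nomatch s (i + 1) (by omega) h2, hdrop]
  · have hz : s.length - i = 0 := by omega
    rw [pvALoop, dif_neg hlt]
    rw [List.drop_eq_nil_iff.mpr (by omega)]
termination_by s.length - i

theorem pvA_jump (s : List Char) (m i : Nat) (him : i + m ≤ s.length)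
    (hno : ∀ k, k < m → ¬ "{{".toList <+: s.drop (i + k)) :
    pvALoop s i [] = (s.drop i).take m ++ pvALoop s (i + m) [] := by
  induction m generalizing i with
  | zero => simp
  | succ m ih =>
    have hlt : i < s.length := by omega
    rw [pvA_skip s i hlt (by simpa using hno 0 (by omega))]
    rw [ih (i + 1) (by omega) (fun k hk => by
      have := hno (k + 1) (by omega)
      have he : i + (k + 1) = i + 1 + k := by omega
      rwa [he] at this)]
    rw [pv_drop_cons s i hlt, List.take_succ_cons]
    have he2 : i + 1 + m = i + (m + 1) := by omega
    rw [he2]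
    simp

theorem pvAFind_none (s : List Char) (j : Nat)
    (h : ¬ "}}".toList <:+: s.drop j) :
    s.length ≤ pvAFind s j + 1 := by
  rw [pvAFind]
  split
  · rename_i hjn
    split
    · rename_i hm
      exact absurd ((pv_close_iff s j).mpr ⟨hjn, hm.1, hm.2⟩).isInfix h
    · refine pvAFind_none s (j + 1) (fun hinf => h ?_)
      have hdrop := pv_drop_cons s j (by omega)
      exact hinf.trans (hdrop ▸ (List.suffix_cons _ _).isInfix)
  · omega
termination_by s.length - j

theorem pvAFind_found (s : List Char) (e j : Nat)
    (hp : "}}".toList <+: s.drop (j + e))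
    (hmin : ∀ k, k < e → ¬ "}}".toList <+: s.drop (j + k)) :
    pvAFind s j = j + e ∧ j + e + 1 < s.length := by
  induction e generalizing j with
  | zero =>
    rcases (pv_close_iff s (j + 0)).mp hp with ⟨hb, h1, h2⟩
    constructor
    · rw [pvAFind, if_pos (by omega), if_pos ⟨by simpa using h1, by simpa using h2⟩]
      omega
    · omega
  | succ e ih =>
    have hb : j + (e + 1) + 1 < s.length := ((pv_close_iff s (j + (e + 1))).mp hp).1
    have hjn : j + 1 < s.length := by omega
    have hnm : ¬ (s.getD j ' ' = '}' ∧ s.getD (j + 1) ' ' = '}') := by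
      intro hc
      exact hmin 0 (by omega) (by simpa using (pv_close_iff s j).mpr ⟨hjn, hc.1, hc.2⟩)
    have hp' : "}}".toList <+: List.drop (j + 1 + e) s := by
      rwa [show j + 1 + e = j + (e + 1) from by omega]
    have hrec := ih (j + 1) hp'
      (fun k hk => by
        have := hmin (k + 1) (by omega)
        have he : j + (k + 1) = j + 1 + k := by omega
        rwa [he] at this)
    rw [pvAFind, if_pos hjn, if_neg hnm]
    omega

theorem pv_main (s : List Char) (i : Nat) (hi : i ≤ s.length) :
    pvALoop s i [] = pvBGo (s.drop i) := by
  rw [pvBGo]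
  dsimp only
  by_cases hf : PySem.Chars.find (List.drop i s) "{{".toList = -1
  · rw [dif_pos hf]
    exact pvA_nomatch s i hi ((PySem.Chars.find_eq_neg_one_iff _ _).mp hf)
  · rw [dif_neg hf]
    obtain ⟨m, hm, hp, hmin⟩ := pv_find_eq _ _ hf
    rw [hm]
    rw [show ((m : Int) + 2) = ((m + 2 : Nat) : Int) from by push_cast; ring,
        PySem.List.slice_from_natCast, PySem.List.slice_to_natCast, List.drop_drop]
    have hmlen : m + 2 ≤ s.length - i := by
      have h2 := hp.length_le
      simp only [List.length_drop] at h2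
      have hl2 : ("{{".toList).length = 2 := rfl
      omega
    have hnok : ∀ k, k < m → ¬ "{{".toList <+: s.drop (i + k) := fun k hk => by
      have h3 := hmin k hk
      rwa [List.drop_drop] at h3
    rw [pvA_jump s m i (by omega) hnok]
    have hpm : "{{".toList <+: s.drop (i + m) := by rwa [List.drop_drop] at hp
    rcases (pv_brace_iff s (i + m)).mp hpm with ⟨hb1, hb2, hb3⟩
    rw [pvALoop, dif_pos (by omega), if_pos ⟨hb1, hb2, hb3⟩]
    dsimp only
    by_cases he : PySem.Chars.find (List.drop (i + (m + 2)) s) "}}".toList = -1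
    · rw [dif_pos he]
      have hninf : ¬ "}}".toList <:+: s.drop (i + m + 2) := by
        have h4 := (PySem.Chars.find_eq_neg_one_iff _ _).mp he
        rwa [show i + (m + 2) = i + m + 2 from by omega] at h4
      rw [if_pos (pvAFind_none s (i + m + 2) hninf)]
      rw [PySem.List.slice_from_natCast]
      have hdd : List.drop (i + m) s = List.drop m (List.drop i s) := by rw [List.drop_drop]
      rw [hdd]
      simp
    · rw [dif_neg he]
      obtain ⟨e, hee, hpe, hemin⟩ := pv_find_eq _ _ he
      rw [hee]
      rw [show ((e : Int) + 2) = ((e + 2 : Nat) : Int) from by push_cast; ring]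
      rw [PySem.List.slice_to_natCast]
      rw [PySem.List.slice_from_natCast (List.drop (i + (m + 2)) s) (e + 2)]
      rw [List.drop_drop]
      have hpe' : "}}".toList <+: s.drop (i + m + 2 + e) := by
        rw [List.drop_drop] at hpe
        rwa [show i + (m + 2) + e = i + m + 2 + e from by omega] at hpe
      have hemink : ∀ k, k < e → ¬ "}}".toList <+: s.drop (i + m + 2 + k) := fun k hk => by
        have h5 := hemin k hk
        rw [List.drop_drop] at h5
        rwa [show i + (m + 2) + k = i + m + 2 + k from by omega] at h5
      obtain ⟨hje, hjb⟩ := pvAFind_found s e (i + m + 2) hpe' hemink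
      have hje' : pvAFind s (i + m + 2) = i + m + 2 + e := hje
      rw [hje']
      rw [if_neg (by omega)]
      rw [pvALoop_acc]
      have helen : i + m + 2 + e + 2 ≤ s.length := by
        have h6 := hpe'.length_le
        simp only [List.length_drop] at h6
        have hl2 : ("}}".toList).length = 2 := rfl
        omega
      have hrec := pv_main s (i + m + 2 + e + 2) helen
      rw [hrec]
      rw [show ((i + m : Nat) : Int) + 2 = ((i + m + 2 : Nat) : Int) from by push_cast; ring,
          PySem.List.slice_natCast,
          show i + m + 2 + e - (i + m + 2) = e from by omega]
      rw [show i + (m + 2) + (e + 2) = i + m + 2 + e + 2 from by omega,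
          show i + (m + 2) = i + m + 2 from by omega]
      simp [List.append_assoc]
termination_by s.length - i
decreasing_by omega

-- ===== VERDICT (by name: the statement is the Claim_ definition above) =====
theorem transform_enhanced_selectors_py_spec : Claim_equal_transform_enhanced_selectors_py := by
  intro js _
  unfold Spec_transform_enhanced_selectors_py transform_enhanced_selectors_py transform_enhanced_selectors_py_alt
  have h := pv_main js.toList 0 (by omega)
  simpa using congrArg String.ofList h
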